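-- pv_equiv track=rewrite | github.com/Existenziell/node-monitor | backend/config_service.py | _validate_bitcoin_address
-- ===== SOURCE A (Python) =====
-- def _validate_bitcoin_address(address: str) -> bool:
--     """Basic Bitcoin address validation."""
--     if not address:
--         return False
--
--     # Basic checks for common Bitcoin address formats
--     if len(address) < 26 or len(address) > 62:
--         return False
--
--     # Check for valid characters (Base58)
--     valid_chars = set("123456789ABCDEFGHJKLMNPQRSTUVWXYZabcdefghijkmnopqrstuvwxyz")
--     if not all(c in valid_chars for c in address):
--         return False
--
--     return True
-- ===== SOURCE B (Python) =====
-- import re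
--
-- _BASE58_RE = re.compile(r"[1-9A-HJ-NP-Za-km-z]{26,62}")
--
-- def _validate_bitcoin_address(address: str) -> bool:
--     """Basic Bitcoin address validation via a single Base58 regex."""
--     return _BASE58_RE.fullmatch(address) is not None
-- ===== Notes on version B (the rewrite author's own statement) =====
-- stated objective: idiomatic
-- what changed: Replaces the explicit empty/length guards and the per-character membership scan over a 58-character set with a single precompiled regex fullmatch whose {26,62} quantifier encodes the length bounds and whose character ranges encode the Base58 alphabet.
import Mathlib
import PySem

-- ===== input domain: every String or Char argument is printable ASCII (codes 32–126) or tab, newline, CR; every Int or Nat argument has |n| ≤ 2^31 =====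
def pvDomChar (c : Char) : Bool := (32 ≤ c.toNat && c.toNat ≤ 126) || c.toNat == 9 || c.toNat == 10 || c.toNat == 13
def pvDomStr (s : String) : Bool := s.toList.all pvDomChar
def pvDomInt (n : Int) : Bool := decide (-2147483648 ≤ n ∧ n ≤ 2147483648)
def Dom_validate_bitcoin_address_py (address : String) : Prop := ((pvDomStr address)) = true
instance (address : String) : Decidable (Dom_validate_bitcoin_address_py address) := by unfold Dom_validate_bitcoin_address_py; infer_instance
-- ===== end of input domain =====

-- B replaces A's explicit guards and set-membership scan by a single regex fullmatch
-- (character-class ranges + a {26,62} quantifier); same cost, more idiomatic.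

-- ===== PORT A =====
-- valid_chars = set("123456789ABCDEFGHJKLMNPQRSTUVWXYZabcdefghijkmnopqrstuvwxyz")
def pvValidCharsA : PySem.Set Char :=
  PySem.Set.ofList "123456789ABCDEFGHJKLMNPQRSTUVWXYZabcdefghijkmnopqrstuvwxyz".toList

def validate_bitcoin_address_py (address : String) : Bool :=
  let cs := address.toList
  if cs.isEmpty then false                                     -- if not address
  else if cs.length < 26 || cs.length > 62 then false          -- length bounds
  else if !(cs.all (fun c => pvValidCharsA.contains c)) then false  -- all(c in valid_chars …)
  else true

-- ===== PORT B =====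
-- the regex character class [1-9A-HJ-NP-Za-km-z], range by range
def pvBase58ClassB (c : Char) : Bool :=
  ('1' ≤ c && c ≤ '9') || ('A' ≤ c && c ≤ 'H') || ('J' ≤ c && c ≤ 'N') ||
  ('P' ≤ c && c ≤ 'Z') || ('a' ≤ c && c ≤ 'k') || ('m' ≤ c && c ≤ 'z')

-- re.fullmatch(r"[…]{26,62}", address) is not None: every char in the class, 26 ≤ len ≤ 62
def validate_bitcoin_address_py_alt (address : String) : Bool :=
  let cs := address.toList
  decide (26 ≤ cs.length ∧ cs.length ≤ 62) && cs.all pvBase58ClassB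

-- ===== PRECONDITION & SPEC =====
def Spec_validate_bitcoin_address_py (address : String) (out : Bool) : Prop := out = validate_bitcoin_address_py_alt address
instance (address : String) (out : Bool) : Decidable (Spec_validate_bitcoin_address_py address out) := by unfold Spec_validate_bitcoin_address_py; infer_instance

-- ===== CLAIM (what is proved, stated in full; the proofs are below) =====
def Claim_equal_validate_bitcoin_address_py : Prop := ∀ (address : String), Dom_validate_bitcoin_address_py address → Spec_validate_bitcoin_address_py address (validate_bitcoin_address_py address)

-- ===== LEMMAS AND PROOFS =====

-- the two per-character tests agree on every ASCII char (enumerated over codes 0..126)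
set_option maxRecDepth 4096 in
theorem pvClass_eq_fin : ∀ n : Fin 127,
    pvValidCharsA.contains (Char.ofNat n) = pvBase58ClassB (Char.ofNat n) := by decide

set_option maxRecDepth 4096 in
theorem pvClass_eq (c : Char) (hc : pvDomChar c = true) :
    pvValidCharsA.contains c = pvBase58ClassB c := by
  have hle : c.toNat ≤ 126 := by
    simp [pvDomChar] at hc; omega
  have h := pvClass_eq_fin ⟨c.toNat, by omega⟩
  simpa [Char.ofNat_toNat] using h

theorem pvAll_eq (cs : List Char) (h : cs.all pvDomChar = true) :
    cs.all (fun c => pvValidCharsA.contains c) = cs.all pvBase58ClassB := by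
  induction cs with
  | nil => simp
  | cons a t ih =>
    simp only [List.all_cons, Bool.and_eq_true] at h
    simp only [List.all_cons, pvClass_eq a h.1, ih h.2]

theorem pvMain_list (cs : List Char) (h : cs.all pvDomChar = true) :
    (if cs.isEmpty then false
     else if cs.length < 26 || cs.length > 62 then false
     else if !(cs.all fun c => pvValidCharsA.contains c) then false
     else true)
    = (decide (26 ≤ cs.length ∧ cs.length ≤ 62) && cs.all pvBase58ClassB) := by
  rw [pvAll_eq cs h]
  by_cases h1 : cs.length < 26
  · have hd : ¬(26 ≤ cs.length ∧ cs.length ≤ 62) := by omega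
    by_cases he : cs.isEmpty <;> simp [he, h1, hd]
  · have he : cs.isEmpty = false := by
      cases cs with
      | nil => simp at h1
      | cons a t => rfl
    by_cases h2 : cs.length > 62
    · have hd : ¬(26 ≤ cs.length ∧ cs.length ≤ 62) := by omega
      simp [he, h1, h2, hd]
    · have hd : 26 ≤ cs.length ∧ cs.length ≤ 62 := by omega
      cases hb : cs.all pvBase58ClassB <;> simp [he, h1, h2, hd]

-- ===== VERDICT (by name: the statement is the Claim_ definition above) =====
theorem validate_bitcoin_address_py_spec : Claim_equal_validate_bitcoin_address_py := by
  intro address hdom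
  have hdom' : address.toList.all pvDomChar = true := by
    simpa [Dom_validate_bitcoin_address_py, pvDomStr] using hdom
  unfold Spec_validate_bitcoin_address_py validate_bitcoin_address_py validate_bitcoin_address_py_alt
  exact pvMain_list address.toList hdom'
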